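-- pv_equiv track=rewrite | github.com/zivdvash/PythonFinalExercise | main.py | split_math_expression
-- ===== SOURCE A (Python) =====
-- def split_math_expression(expression):
--     tokens = []
--     current_token = ''
--
--     for char in expression:
--         if char.isdigit() or char == '.':
--             current_token += char
--         else:
--             if current_token:
--                 tokens.append(current_token)
--                 current_token = ''
--             if char.strip():
--                 tokens.append(char)
--
--     if current_token:
--         tokens.append(current_token)
--
--     return tokens
-- ===== SOURCE B (Python) =====
-- from itertools import groupby
--
--
-- def split_math_expression(expression):
--     tokens = []
--     for is_num, group in groupby(expression, key=lambda c: c.isdigit() or c == '.'):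
--         if is_num:
--             tokens.append(''.join(group))
--         else:
--             tokens.extend(ch for ch in group if ch.strip())
--     return tokens
-- ===== Notes on version B (the rewrite author's own statement) =====
-- stated objective: alternative
-- what changed: Replaces A's character-by-character loop with a running current_token accumulator by itertools.groupby partitioning the string into maximal digit/'.' runs, then emitting each numeric run as one token and each non-whitespace char of other runs individually.
import Mathlib
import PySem

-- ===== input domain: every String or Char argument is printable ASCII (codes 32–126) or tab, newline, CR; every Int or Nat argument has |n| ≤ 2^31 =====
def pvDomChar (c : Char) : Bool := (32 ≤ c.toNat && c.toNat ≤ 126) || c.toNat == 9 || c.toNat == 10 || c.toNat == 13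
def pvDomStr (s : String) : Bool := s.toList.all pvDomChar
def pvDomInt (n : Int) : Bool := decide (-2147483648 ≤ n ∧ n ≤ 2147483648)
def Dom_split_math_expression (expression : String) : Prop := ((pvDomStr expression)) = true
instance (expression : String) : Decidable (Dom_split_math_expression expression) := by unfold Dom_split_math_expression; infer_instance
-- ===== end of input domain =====

-- B tokenizes by partitioning the string into maximal digit/'.' runs (groupby) instead of
-- A's running current_token accumulator; objective: alternative decomposition, same cost.

-- ===== PORT A =====
-- A's loop: state = (tokens, current_token as List Char), branches in A's order.
def pvALoop : List Char → List String → List Char → List String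
  | [], tokens, cur => if cur.isEmpty then tokens else tokens ++ [String.mk cur]
  | c :: rest, tokens, cur =>
    if PySem.Chars.isdigit c || c == '.' then
      pvALoop rest tokens (cur ++ [c])
    else
      let tokens1 := if cur.isEmpty then tokens else tokens ++ [String.mk cur]
      let tokens2 := if (PySem.Chars.strip [c]).isEmpty then tokens1 else tokens1 ++ [String.mk [c]]
      pvALoop rest tokens2 []

def split_math_expression (expression : String) : List String :=
  pvALoop expression.toList [] []

-- ===== PORT B =====
def pvBKey (c : Char) : Bool := PySem.Chars.isdigit c || c == '.'

-- itertools.groupby: maximal runs of equal key, in order, each run materialized.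
def pvBGroups : List Char → List (Bool × List Char)
  | [] => []
  | c :: rest =>
    match pvBGroups rest with
    | (k, g) :: gs => if pvBKey c = k then (k, c :: g) :: gs else (pvBKey c, [c]) :: (k, g) :: gs
    | [] => [(pvBKey c, [c])]

def split_math_expression_alt (expression : String) : List String :=
  (pvBGroups expression.toList).foldl
    (fun tokens kg =>
      if kg.1 then tokens ++ [String.mk kg.2]
      else tokens ++ (kg.2.filter (fun c => !(PySem.Chars.strip [c]).isEmpty)).map (fun c => String.mk [c]))
    []

-- ===== PRECONDITION & SPEC =====
def Spec_split_math_expression (expression : String) (out : List String) : Prop := out = split_math_expression_alt expression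
instance (expression : String) (out : List String) : Decidable (Spec_split_math_expression expression out) := by unfold Spec_split_math_expression; infer_instance

-- ===== CLAIM (what is proved, stated in full; the proofs are below) =====
def Claim_equal_split_math_expression : Prop := ∀ (expression : String), Dom_split_math_expression expression → Spec_split_math_expression expression (split_math_expression expression)

-- ===== LEMMAS AND PROOFS =====

def pvEmit (cur : List Char) : List String := if cur.isEmpty then [] else [String.mk cur]

def pvNonNum (g : List Char) : List String :=
  (g.filter (fun c => !(PySem.Chars.strip [c]).isEmpty)).map (fun c => String.mk [c])

def pvF (kg : Bool × List Char) : List String := if kg.1 then [String.mk kg.2] else pvNonNum kg.2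

-- A's loop re-expressed over the group list, carrying the pending numeric run `cur`.
def pvProc : List Char → List (Bool × List Char) → List String
  | cur, [] => pvEmit cur
  | cur, (k, g) :: gs => if k then pvProc (cur ++ g) gs else pvEmit cur ++ pvNonNum g ++ pvProc [] gs

def pvHeadKey : List (Bool × List Char) → Option Bool
  | [] => none
  | (k, _) :: _ => some k

def pvOk : List (Bool × List Char) → Prop
  | [] => True
  | (k, g) :: gs => g ≠ [] ∧ pvHeadKey gs ≠ some k ∧ pvOk gs

theorem pvALoop_append (cs : List Char) : ∀ (toks : List String) (cur : List Char),
    pvALoop cs toks cur = toks ++ pvALoop cs [] cur := by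
  induction cs with
  | nil => intro toks cur; simp [pvALoop]; split <;> simp
  | cons c rest ih =>
    intro toks cur
    simp only [pvALoop]
    split
    · rw [ih toks, ih []]
    · rw [ih, ih (((if (PySem.Chars.strip [c]).isEmpty then _ else _)))]
      split <;> split <;> simp

theorem pvALoop_eq_proc (cs : List Char) : ∀ (cur : List Char),
    pvALoop cs [] cur = pvProc cur (pvBGroups cs) := by
  induction cs with
  | nil => intro cur; simp [pvALoop, pvBGroups, pvProc, pvEmit]
  | cons c rest ih =>
    intro cur
    simp only [pvALoop, pvBGroups]
    by_cases hk : (PySem.Chars.isdigit c || c == '.') = true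
    · rw [if_pos hk]
      rw [ih (cur ++ [c])]
      cases hg : pvBGroups rest with
      | nil => simp [hk, pvBKey, pvProc]
      | cons p gs =>
        obtain ⟨k, g⟩ := p
        by_cases hkk : pvBKey c = k
        · subst hkk
          simp [pvBKey, hk, pvProc, pvProc]
        · have hkf : k = false := by
            cases k
            · rfl
            · exact absurd (by simp [pvBKey, hk]) hkk
          subst hkf
          simp [pvBKey, hk, pvProc]
    · rw [if_neg hk]
      rw [pvALoop_append, ih []]
      have hkey : pvBKey c = false := by simp [pvBKey] at hk ⊢; exact hk
      cases hg : pvBGroups rest with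
      | nil =>
        simp [hkey, pvProc, pvEmit, pvNonNum]
        split <;> split <;> simp_all
      | cons p gs =>
        obtain ⟨k, g⟩ := p
        cases k
        · -- merge into a non-numeric run
          split <;> split <;> simp_all [pvProc, pvEmit, pvNonNum]
        · split <;> split <;> simp_all [pvProc, pvEmit, pvNonNum]

theorem pvOk_groups (cs : List Char) : pvOk (pvBGroups cs) := by
  induction cs with
  | nil => trivial
  | cons c rest ih =>
    simp only [pvBGroups]
    cases hg : pvBGroups rest with
    | nil => exact ⟨by simp, by simp [pvHeadKey], trivial⟩
    | cons p gs =>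
      obtain ⟨k, g⟩ := p
      rw [hg] at ih
      dsimp only
      by_cases hkk : pvBKey c = k
      · rw [if_pos hkk]
        exact ⟨by simp, ih.2.1, ih.2.2⟩
      · rw [if_neg hkk]
        exact ⟨by simp, by simp [pvHeadKey]; exact fun h => hkk h.symm, ih⟩

theorem pvProc_flat : ∀ (gs : List (Bool × List Char)), pvOk gs →
    (pvProc [] gs = gs.flatMap pvF) ∧
    (∀ cur, cur ≠ [] → pvHeadKey gs ≠ some true →
      pvProc cur gs = String.mk cur :: gs.flatMap pvF) := by
  intro gs
  induction gs with
  | nil =>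
    intro _
    refine ⟨by simp [pvProc, pvEmit], ?_⟩
    intro cur hcur _
    simp [pvProc, pvEmit, hcur]
  | cons p gs ih =>
    rintro ⟨hne, hhd, hok⟩
    obtain ⟨k, g⟩ := p
    obtain ⟨ih1, ih2⟩ := ih hok
    cases k
    · constructor
      · simp [pvProc, pvEmit, pvF, ih1]
      · intro cur hcur _
        simp [pvProc, pvEmit, hcur, pvF, ih1]
    · have h2 := ih2 g hne (by simpa using hhd)
      constructor
      · simp [pvProc, pvF, h2]
      · intro cur hcur habs
        simp [pvHeadKey] at habs

theorem pvFoldl_flat (gs : List (Bool × List Char)) : ∀ (acc : List String),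
    gs.foldl
      (fun tokens kg =>
        if kg.1 then tokens ++ [String.mk kg.2]
        else tokens ++ (kg.2.filter (fun c => !(PySem.Chars.strip [c]).isEmpty)).map (fun c => String.mk [c]))
      acc = acc ++ gs.flatMap pvF := by
  induction gs with
  | nil => intro acc; simp
  | cons p gs ih =>
    intro acc
    obtain ⟨k, g⟩ := p
    cases k <;> simp [List.foldl_cons, ih, pvF, pvNonNum]

-- ===== VERDICT (by name: the statement is the Claim_ definition above) =====
theorem split_math_expression_spec : Claim_equal_split_math_expression := by
  intro e _
  show split_math_expression e = split_math_expression_alt e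
  rw [split_math_expression, split_math_expression_alt,
    pvALoop_eq_proc, (pvProc_flat _ (pvOk_groups e.toList)).1, pvFoldl_flat]
  simp
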